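-- pv_equiv track=rewrite | github.com/Ramkens/mi-host-bot | app/services/code_analyzer.py | _detect_entrypoint
-- ===== SOURCE A (Python) =====
-- from typing import Iterable, Optional
--
-- ENTRYPOINT_HINTS = (
--     "main.py",
--     "bot.py",
--     "app.py",
--     "run.py",
--     "start.py",
--     "__main__.py",
-- )
--
-- def _detect_entrypoint(names: Iterable[str]) -> Optional[str]:
--     name_set = {n.split("/")[-1] for n in names}
--     for hint in ENTRYPOINT_HINTS:
--         for n in names:
--             if n.split("/")[-1] == hint:
--                 return n
--     # fallback: any top-level .py
--     py_files = [n for n in names if n.endswith(".py") and "/" not in n]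
--     if py_files:
--         return py_files[0]
--     return None
-- ===== SOURCE B (Python) =====
-- from typing import Iterable, Optional
--
-- ENTRYPOINT_HINTS = (
--     "main.py",
--     "bot.py",
--     "app.py",
--     "run.py",
--     "start.py",
--     "__main__.py",
-- )
--
-- def _detect_entrypoint(names: Iterable[str]) -> Optional[str]:
--     # One pass: index first name per basename, record first top-level .py fallback.
--     first_by_basename = {}
--     fallback = None
--     for n in names:
--         basename = n.split("/")[-1]
--         if basename not in first_by_basename:
--             first_by_basename[basename] = n
--         if fallback is None and n.endswith(".py") and "/" not in n:
--             fallback = n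
--     for hint in ENTRYPOINT_HINTS:
--         if hint in first_by_basename:
--             return first_by_basename[hint]
--     return fallback
-- ===== Notes on version B (the rewrite author's own statement) =====
-- stated objective: faster
-- what changed: B makes a single pass over names building a first-wins basename->name dict and recording the first top-level .py fallback, then does one O(1) lookup per hint, instead of A's rescan of the entire names list for every hint plus a separate filter pass for the fallback.
import Mathlib
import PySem

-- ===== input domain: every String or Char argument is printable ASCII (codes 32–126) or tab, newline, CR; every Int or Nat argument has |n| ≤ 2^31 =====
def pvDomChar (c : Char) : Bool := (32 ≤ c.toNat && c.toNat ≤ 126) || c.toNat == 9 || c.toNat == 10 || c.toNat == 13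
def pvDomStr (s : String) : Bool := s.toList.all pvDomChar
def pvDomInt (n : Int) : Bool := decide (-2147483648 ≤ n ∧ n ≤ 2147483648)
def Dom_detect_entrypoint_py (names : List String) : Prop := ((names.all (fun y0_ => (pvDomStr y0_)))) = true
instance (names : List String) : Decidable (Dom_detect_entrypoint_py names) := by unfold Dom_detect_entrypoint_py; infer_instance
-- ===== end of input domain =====

-- B makes one pass (first-wins dict + first fallback) instead of A's per-hint rescan of names; return values proved equal.

-- ===== PORT A =====
-- n.split("/")[-1]; split never returns [], so getLast?.getD "" is exact
def pvBasename (n : String) : String := (((PySem.Str.split? n "/").getD []).getLast?).getD ""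

def pvEntrypointHints : List String :=
  ["main.py", "bot.py", "app.py", "run.py", "start.py", "__main__.py"]

-- inner 'for n in names: if n.split("/")[-1] == hint: return n'
def pvScan (hint : String) : List String → Option String
  | [] => none
  | n :: rest => if pvBasename n = hint then some n else pvScan hint rest

-- outer 'for hint in ENTRYPOINT_HINTS'
def pvHintLoopA (names : List String) : List String → Option String
  | [] => none
  | h :: hs =>
    match pvScan h names with
    | some n => some n
    | none => pvHintLoopA names hs

def detect_entrypoint_py (names : List String) : Option String :=
  let _name_set := PySem.Set.ofList (names.map pvBasename)  -- dead 'name_set' comprehension of A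
  match pvHintLoopA names pvEntrypointHints with
  | some n => some n
  | none =>
    let py_files := names.filter (fun n => PySem.Str.endswith n ".py" && !(PySem.Str.isIn "/" n))
    match py_files with
    | [] => none
    | n :: _ => some n

-- ===== PORT B =====
-- single pass: (first-wins dict basename→name, first top-level .py fallback)
def pvStepB (acc : PySem.Dict String String × Option String) (n : String) :
    PySem.Dict String String × Option String :=
  let b := pvBasename n
  let d := if acc.1.contains b then acc.1 else acc.1.insert b n
  let fb := if acc.2.isNone && PySem.Str.endswith n ".py" && !(PySem.Str.isIn "/" n)
            then some n else acc.2
  (d, fb)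

def pvLookupB (d : PySem.Dict String String) : List String → Option String
  | [] => none
  | h :: hs =>
    match d.get? h with
    | some n => some n
    | none => pvLookupB d hs

def detect_entrypoint_py_alt (names : List String) : Option String :=
  let st := names.foldl pvStepB (PySem.Dict.empty, none)
  match pvLookupB st.1 pvEntrypointHints with
  | some n => some n
  | none => st.2

-- ===== PRECONDITION & SPEC =====
def Spec_detect_entrypoint_py (names : List String) (out : Option String) : Prop := out = detect_entrypoint_py_alt names
instance (names : List String) (out : Option String) : Decidable (Spec_detect_entrypoint_py names out) := by unfold Spec_detect_entrypoint_py; infer_instance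

-- ===== CLAIM (what is proved, stated in full; the proofs are below) =====
def Claim_equal_detect_entrypoint_py : Prop := ∀ (names : List String), Dom_detect_entrypoint_py names → Spec_detect_entrypoint_py names (detect_entrypoint_py names)

-- ===== LEMMAS AND PROOFS =====

-- the dict built by the fold answers lookups like a first-match scan of names
theorem pvFold_get (names : List String) (d : PySem.Dict String String) (fb : Option String)
    (k : String) :
    ((names.foldl pvStepB (d, fb)).1).get? k = ((d.get? k).or (pvScan k names)) := by
  induction names generalizing d fb with
  | nil => simp [pvScan]
  | cons n rest ih =>
      simp only [List.foldl_cons, pvScan]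
      by_cases hc : d.contains (pvBasename n)
      · have : pvStepB (d, fb) n = (d, (pvStepB (d, fb) n).2) := by
          simp [pvStepB, hc]
        rw [this, ih]
        by_cases hb : pvBasename n = k
        · subst hb
          rw [PySem.Dict.contains_eq_isSome_get?] at hc
          obtain ⟨v, hv⟩ := Option.isSome_iff_exists.mp hc
          simp [hv, Option.or]
        · simp [hb]
      · have hc' : d.contains (pvBasename n) = false := Bool.eq_false_iff.mpr hc
        have hget : d.get? (pvBasename n) = none := by
          have := PySem.Dict.contains_eq_isSome_get? d (pvBasename n)
          rw [hc'] at this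
          exact Option.not_isSome_iff_eq_none.mp (by simp [← this])
        have : pvStepB (d, fb) n = (d.insert (pvBasename n) n, (pvStepB (d, fb) n).2) := by
          simp [pvStepB, hc']
        rw [this, ih, PySem.Dict.get?_insert]
        by_cases hb : pvBasename n = k
        · subst hb; simp [hget, Option.or]
        · simp [Ne.symm hb, hb]

-- the fallback slot of the fold is the first top-level .py in names (after fb)
theorem pvFold_fb (names : List String) (d : PySem.Dict String String) (fb : Option String) :
    (names.foldl pvStepB (d, fb)).2
      = fb.or ((names.filter (fun n => PySem.Str.endswith n ".py" && !(PySem.Str.isIn "/" n))).head?) := by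
  induction names generalizing d fb with
  | nil => simp
  | cons n rest ih =>
      simp only [List.foldl_cons, List.filter_cons]
      cases fb <;> cases he : PySem.Chars.endswith n.toList ['.', 'p', 'y'] <;>
        cases hi : PySem.Chars.isIn ['/'] n.toList <;>
        simp [pvStepB, he, hi, ih, Option.or]

-- lookup in the fold's dict over any hint list equals A's per-hint rescan
theorem pvLookup_eq (names hints : List String) :
    pvLookupB ((names.foldl pvStepB (PySem.Dict.empty, none)).1) hints
      = pvHintLoopA names hints := by
  induction hints with
  | nil => rfl
  | cons h hs ih =>
      simp only [pvLookupB, pvHintLoopA, pvFold_get, PySem.Dict.get?_empty, Option.or, ih]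

-- ===== VERDICT (by name: the statement is the Claim_ definition above) =====
theorem detect_entrypoint_py_spec : Claim_equal_detect_entrypoint_py := by
  intro names _
  show detect_entrypoint_py names = detect_entrypoint_py_alt names
  simp only [detect_entrypoint_py, detect_entrypoint_py_alt]
  rw [pvLookup_eq, pvFold_fb]
  cases pvHintLoopA names pvEntrypointHints with
  | some n => rfl
  | none =>
      simp only [Option.or]
      cases names.filter (fun n => PySem.Str.endswith n ".py" && !(PySem.Str.isIn "/" n)) with
      | nil => rfl
      | cons a l => rfl
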